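-- pv_equiv track=rewrite | github.com/yongheelee87/DevEnv | SwCodeParse/Lib/DataProcess/code/codeParse.py | _split_funcs
-- ===== SOURCE A (Python) =====
-- def _split_funcs(code):
--     lst_func = []
--     lst_descript = []
--
--     lst_idx_code = [index for index, line in enumerate(code) if line.count('Description') or line.count('Return')]
--
--     for idx_des, idx_return in zip(lst_idx_code[::2], lst_idx_code[1::2]):
--         idx_end = idx_return + 1
--         lst_descript.append(code[idx_des:idx_end])
--         while idx_end < len(code):
--             if '{' in code[idx_end]:
--                 break
--             idx_end += 1
--         lst_func.append(code[idx_end - 1])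
--     return lst_descript, lst_func
-- ===== SOURCE B (Python) =====
-- def _split_funcs(code):
--     # One pre-pass collects marker and brace line numbers; a single monotone
--     # pointer into `braces` then replaces A's per-pair rescan of the code.
--     markers = [i for i, line in enumerate(code) if 'Description' in line or 'Return' in line]
--     braces = [i for i, line in enumerate(code) if '{' in line]
--     descript, funcs = [], []
--     bp = 0
--     it = iter(markers)
--     for d, r in zip(it, it):
--         descript.append(code[d:r + 1])
--         while bp < len(braces) and braces[bp] <= r:
--             bp += 1
--         end = braces[bp] if bp < len(braces) else len(code)
--         funcs.append(code[end - 1])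
--     return descript, funcs
-- ===== Notes on version B (the rewrite author's own statement) =====
-- stated objective: alternative
-- what changed: A rescans the code forward from each description block to find the next '{' line; B instead collects all marker and '{' line indices in one pre-pass and walks a single monotone pointer over the brace-index list, so the per-pair inner scan over the code disappears.
import Mathlib
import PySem

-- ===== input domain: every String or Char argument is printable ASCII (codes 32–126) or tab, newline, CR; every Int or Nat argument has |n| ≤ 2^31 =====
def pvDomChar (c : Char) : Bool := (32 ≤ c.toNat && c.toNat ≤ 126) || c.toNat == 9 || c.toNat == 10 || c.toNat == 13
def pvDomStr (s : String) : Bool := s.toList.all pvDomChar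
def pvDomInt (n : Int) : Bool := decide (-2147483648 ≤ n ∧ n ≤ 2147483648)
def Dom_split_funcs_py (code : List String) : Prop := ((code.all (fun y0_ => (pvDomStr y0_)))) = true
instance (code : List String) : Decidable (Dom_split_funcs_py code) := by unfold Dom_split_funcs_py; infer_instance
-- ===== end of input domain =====

-- B replaces A's per-pair forward rescan of `code` by one pre-pass collecting the
-- '{'-line indices and a single monotone pointer into that list (objective: alternative).

-- ===== PORT A =====
-- A's `while idx_end < len(code): if '{' in code[idx_end]: break; idx_end += 1` loop
def aScan (code : List String) (i : Int) : Int :=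
  if h : i < (code.length : Int) then
    if PySem.Str.isIn "{" ((PySem.List.pyGet? code i).getD "") then i
    else aScan code (i + 1)
  else i
termination_by ((code.length : Int) - i).toNat
decreasing_by omega

-- the body of A's `for idx_des, idx_return in zip(...)` loop; state = (lst_descript, lst_func)
def aBody (code : List String) (st : List (List String) × List String) (dr : Int × Int) :
    List (List String) × List String :=
  let idx_end := dr.2 + 1
  let descript := st.1 ++ [PySem.List.slice code (some dr.1) (some idx_end)]
  let idx_end2 := aScan code idx_end
  (descript, st.2 ++ [(PySem.List.pyGet? code (idx_end2 - 1)).getD ""])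

def split_funcs_py (code : List String) : List (List String) × List String :=
  let lst_idx_code : List Int := (PySem.List.enumerate code).filterMap
    (fun p => if PySem.Str.count p.2 "Description" ≠ 0 ∨ PySem.Str.count p.2 "Return" ≠ 0
              then some p.1 else none)
  let evens := (PySem.List.slice? lst_idx_code none none 2).getD []
  let odds := (PySem.List.slice? lst_idx_code (some 1) none 2).getD []
  (evens.zip odds).foldl (aBody code) ([], [])

-- ===== PORT B =====
-- B's `for d, r in zip(it, it)` over `it = iter(markers)`: consume markers two at a time
def pairUp : List Int → List (Int × Int)
  | d :: r :: t => (d, r) :: pairUp t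
  | _ => []

-- B's `while bp < len(braces) and braces[bp] <= r: bp += 1`
def altAdvance (braces : List Int) (r : Int) (bp : Nat) : Nat :=
  if bp < braces.length ∧ braces.getD bp 0 ≤ r then altAdvance braces r (bp + 1) else bp
termination_by braces.length - bp
decreasing_by omega

-- the body of B's for loop; state = (descript, funcs, bp)
def bBody (code : List String) (braces : List Int)
    (st : List (List String) × List String × Nat) (dr : Int × Int) :
    List (List String) × List String × Nat :=
  let bp := altAdvance braces dr.2 st.2.2
  let endIdx : Int := if bp < braces.length then braces.getD bp 0 else (code.length : Int)
  (st.1 ++ [PySem.List.slice code (some dr.1) (some (dr.2 + 1))],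
   st.2.1 ++ [(PySem.List.pyGet? code (endIdx - 1)).getD ""],
   bp)

def split_funcs_py_alt (code : List String) : List (List String) × List String :=
  let markers : List Int := (PySem.List.enumerate code).filterMap
    (fun p => if PySem.Str.isIn "Description" p.2 || PySem.Str.isIn "Return" p.2
              then some p.1 else none)
  let braces : List Int := (PySem.List.enumerate code).filterMap
    (fun p => if PySem.Str.isIn "{" p.2 then some p.1 else none)
  let st := (pairUp markers).foldl (bBody code braces) ([], [], 0)
  (st.1, st.2.1)

-- ===== PRECONDITION & SPEC =====
def Spec_split_funcs_py (code : List String) (out : List (List String) × List String) : Prop := out = split_funcs_py_alt code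
instance (code : List String) (out : List (List String) × List String) : Decidable (Spec_split_funcs_py code out) := by unfold Spec_split_funcs_py; infer_instance

-- ===== CLAIM (what is proved, stated in full; the proofs are below) =====
def Claim_equal_split_funcs_py : Prop := ∀ (code : List String), Dom_split_funcs_py code → Spec_split_funcs_py code (split_funcs_py code)

-- ===== LEMMAS AND PROOFS =====

theorem go_ge (sub : List Char) (fuel : Nat) : ∀ (l : List Char) (acc : Nat),
    acc ≤ PySem.Chars.count.go sub fuel l acc := by
  induction fuel with
  | zero => intro l acc; rw [PySem.Chars.count.go]
  | succ n ih =>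
    intro l acc
    cases l with
    | nil => rw [PySem.Chars.count.go]; omega
    | cons h t =>
      rw [PySem.Chars.count.go]
      split
      · exact le_trans (Nat.le_succ acc) (ih _ _)
      · exact ih _ _

theorem go_of_not_infix (sub : List Char) (fuel : Nat) : ∀ (l : List Char) (acc : Nat),
    ¬ sub <:+: l → PySem.Chars.count.go sub fuel l acc = acc := by
  induction fuel with
  | zero => intro l acc _; rw [PySem.Chars.count.go]
  | succ n ih =>
    intro l acc hn
    cases l with
    | nil => rw [PySem.Chars.count.go]; omega
    | cons h t =>
      rw [PySem.Chars.count.go]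
      split
      · rename_i hp
        exact absurd ((List.isPrefixOf_iff_prefix.mp hp).isInfix) hn
      · exact ih t acc (fun hi => hn (hi.trans (List.suffix_cons h t).isInfix))

theorem go_pos (sub : List Char) (hs : sub ≠ []) (fuel : Nat) : ∀ (l : List Char) (acc : Nat),
    l.length ≤ fuel → sub <:+: l → acc < PySem.Chars.count.go sub fuel l acc := by
  induction fuel with
  | zero =>
    intro l acc hl hi
    cases l with
    | nil => exact absurd (List.eq_nil_of_infix_nil hi) hs
    | cons h t => simp at hl
  | succ n ih =>
    intro l acc hl hi
    cases l with
    | nil => exact absurd (List.eq_nil_of_infix_nil hi) hs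
    | cons h t =>
      rw [PySem.Chars.count.go]
      split
      · exact lt_of_lt_of_le (Nat.lt_succ_self acc) (go_ge _ _ _ _)
      · rename_i hp
        rcases (List.infix_cons_iff.mp hi) with hpre | hinf
        · exact absurd (List.isPrefixOf_iff_prefix.mpr hpre) (by simpa using hp)
        · exact ih t acc (by simpa using Nat.le_of_succ_le_succ hl) hinf

theorem count_ne_zero_iff (s sub : List Char) (hs : sub ≠ []) :
    (PySem.Chars.count s sub ≠ 0) ↔ PySem.Chars.isIn sub s = true := by
  rw [PySem.Chars.isIn_iff_infix, PySem.Chars.count]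
  simp only [List.isEmpty_iff, hs, if_false]
  constructor
  · intro h
    by_contra hn
    exact h (go_of_not_infix sub s.length s 0 hn)
  · intro h
    have := go_pos sub hs s.length s 0 le_rfl h
    omega

def everyOther : List Int → List Int
  | [] => []
  | [a] => [a]
  | a :: _ :: t => a :: everyOther t

theorem everyOther_cons (b : Int) (t : List Int) :
    everyOther (b :: t) = b :: everyOther t.tail := by
  cases t <;> rfl

theorem evens_formula (xs : List Int) : ∀ (m : Nat), xs.length ≤ 2 * m →
    (List.range m).filterMap (fun k => xs[2 * k]?) = everyOther xs := by
  induction xs using everyOther.induct with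
  | case1 =>
    intro m _
    simp [everyOther]
  | case2 a =>
    intro m hm
    have hm' : 1 ≤ m := by simp at hm; omega
    obtain ⟨m, rfl⟩ : ∃ m', m = m' + 1 := ⟨m - 1, by omega⟩
    rw [List.range_succ_eq_map]
    simp only [List.filterMap_cons, List.filterMap_map]
    norm_num [everyOther, List.filterMap_eq_nil_iff]
  | case3 a b t ih =>
    intro m hm
    have hm' : 1 ≤ m := by simp at hm; omega
    obtain ⟨m, rfl⟩ : ∃ m', m = m' + 1 := ⟨m - 1, by omega⟩
    rw [List.range_succ_eq_map]
    simp only [List.filterMap_cons, List.filterMap_map]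
    have : ∀ k : Nat, (a :: b :: t)[2 * (k + 1)]? = t[2 * k]? := by
      intro k
      have h2 : 2 * (k + 1) = 2 * k + 1 + 1 := by ring
      rw [h2]
      simp
    norm_num [everyOther, Function.comp_def, this]
    exact ih m (by simp at hm ⊢; omega)

theorem zip_everyOther (xs : List Int) :
    (everyOther xs).zip (everyOther xs.tail) = pairUp xs := by
  induction xs using pairUp.induct with
  | case1 d r t ih =>
    rw [show (d :: r :: t).tail = r :: t from rfl, everyOther_cons r t]
    show (d :: everyOther t).zip (r :: everyOther t.tail) = (d, r) :: pairUp t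
    rw [List.zip_cons_cons, ih]
  | case2 xs h =>
    cases xs with
    | nil => rfl
    | cons a tl =>
      cases tl with
      | nil => rfl
      | cons b tl2 => exact absurd rfl (h a b tl2)

theorem slice?_even (xs : List Int) :
    (PySem.List.slice? xs none none 2).getD [] = everyOther xs := by
  rw [PySem.List.slice?, PySem.List.sliceIndices]
  norm_num
  rw [List.filterMap_congr (g := fun k => xs[2 * k]?)
      (by intro k _; congr 1)]
  apply evens_formula
  split <;> omega

theorem slice?_odd (xs : List Int) :
    (PySem.List.slice? xs (some 1) none 2).getD [] = everyOther xs.tail := by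
  rw [PySem.List.slice?, PySem.List.sliceIndices]
  norm_num
  cases xs with
  | nil => norm_num [everyOther]
  | cons a t =>
    have h1 : min (1 : Int) ((a :: t).length : Int) = 1 := by simp
    rw [h1]
    norm_num
    rw [List.filterMap_congr (g := fun k => t[2 * k]?)
        (by intro k _
            have h2 : ((1 : Int) + 2 * (k : Int)).toNat = 2 * k + 1 := by omega
            rw [h2]
            simp)]
    apply evens_formula
    simp only [List.length_cons] at *
    split <;> omega
def braceLine (s : String) : Bool := PySem.Str.isIn "{" s

def firstFrom (code : List String) (i : Nat) : Nat :=
  i + List.findIdx braceLine (code.drop i)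

theorem aScan_eq (code : List String) : ∀ (fuel i : Nat), code.length ≤ i + fuel →
    aScan code (i : Int) = (firstFrom code i : Int) := by
  intro fuel
  induction fuel with
  | zero =>
    intro i hi
    rw [aScan, firstFrom]
    have hd : code.drop i = [] := List.drop_eq_nil_of_le (by omega)
    rw [hd]
    simp
    omega
  | succ n ih =>
    intro i hi
    rw [aScan, firstFrom]
    by_cases h : i < code.length
    · rw [dif_pos (by exact_mod_cast h)]
      have hg : (PySem.List.pyGet? code (i : Int)).getD "" = code[i] := by
        simp [PySem.List.pyGet?_natCast, List.getElem?_eq_getElem h]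
      rw [hg]
      rw [List.drop_eq_getElem_cons h, List.findIdx_cons]
      by_cases hb : braceLine code[i]
      · have hb' : PySem.Str.isIn "{" code[i] = true := hb
        rw [if_pos hb', hb]
        simp
      · have hb' : ¬ PySem.Str.isIn "{" code[i] = true := hb
        rw [if_neg hb', Bool.eq_false_iff.mpr hb]
        simp only [cond_false]
        have := ih (i + 1) (by omega)
        rw [firstFrom] at this
        push_cast at this ⊢
        omega
    · rw [dif_neg (by exact_mod_cast h)]
      have hd : code.drop i = [] := List.drop_eq_nil_of_le (by omega)
      rw [hd]
      simp

theorem firstFrom_le_length (code : List String) (i : Nat) (hi : i ≤ code.length) :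
    firstFrom code i ≤ code.length := by
  have := List.findIdx_le_length (p := braceLine) (xs := code.drop i)
  rw [firstFrom]
  simp [List.length_drop] at this ⊢
  omega

theorem firstFrom_ge (code : List String) (i : Nat) : i ≤ firstFrom code i :=
  Nat.le_add_right _ _

theorem firstFrom_not_brace (code : List String) (i j : Nat) (hij : i ≤ j)
    (hj : j < firstFrom code i) (hjl : j < code.length) : braceLine code[j] = false := by
  have hlt : j - i < List.findIdx braceLine (code.drop i) := by rw [firstFrom] at hj; omega
  have hlen : j - i < (code.drop i).length := by
    have := List.findIdx_le_length (p := braceLine) (xs := code.drop i)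
    omega
  have := List.not_of_lt_findIdx hlt
  rw [List.getElem_drop] at this
  simpa [show i + (j - i) = j from by omega] using this

theorem firstFrom_brace (code : List String) (i : Nat)
    (h : firstFrom code i < code.length) : braceLine code[firstFrom code i] = true := by
  have hlen : List.findIdx braceLine (code.drop i) < (code.drop i).length := by
    rw [firstFrom] at h; simp [List.length_drop]; omega
  have := List.findIdx_getElem (w := hlen)
  rwa [List.getElem_drop] at this

theorem firstFrom_eq (code : List String) (i e : Nat) (hie : i ≤ e) (he : e ≤ code.length)
    (hb : ∀ hel : e < code.length, braceLine (code[e]'hel) = true)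
    (hmin : ∀ j, i ≤ j → j < e → ∀ (hj : j < code.length), braceLine code[j] = false) :
    firstFrom code i = e := by
  rcases lt_trichotomy (firstFrom code i) e with hlt | heq | hgt
  · have hfl : firstFrom code i < code.length := by omega
    have := firstFrom_brace code i hfl
    rw [hmin _ (firstFrom_ge code i) hlt hfl] at this
    exact absurd this (by simp)
  · exact heq
  · have hel : e < code.length := by
      have := firstFrom_le_length code i (by omega)
      omega
    have := firstFrom_not_brace code i e hie hgt hel
    rw [hb hel] at this
    exact absurd this (by simp)

def bracesOf (code : List String) : List Int :=
  (PySem.List.enumerate code).filterMap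
    (fun p => if PySem.Str.isIn "{" p.2 then some p.1 else none)

theorem mem_bracesOf (code : List String) (x : Int) :
    x ∈ bracesOf code ↔ ∃ (k : Nat) (hk : k < code.length), x = (k : Int) ∧ braceLine (code[k]'hk) = true := by
  rw [bracesOf]
  simp only [List.mem_filterMap]
  constructor
  · rintro ⟨p, hp, hx⟩
    rcases (PySem.List.mem_enumerate_iff code 0 p).mp hp with ⟨k, hk, rfl⟩
    split at hx
    · rename_i hbr
      exact ⟨k, hk, by simpa using hx.symm, hbr⟩
    · exact absurd hx (by simp)
  · rintro ⟨k, hk, rfl, hbr⟩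
    refine ⟨((k : Int), code[k]'hk), (PySem.List.mem_enumerate_iff code 0 _).mpr ⟨k, hk, by simp⟩, ?_⟩
    have hbr' : PySem.Str.isIn "{" (code[k]'hk) = true := hbr
    simp only [if_pos hbr']

theorem bracesOf_sorted (code : List String) : (bracesOf code).Pairwise (· < ·) := by
  rw [bracesOf]
  rw [List.pairwise_filterMap]
  refine (PySem.List.pairwise_lt_enumerate code 0).imp ?_
  intro a b hab x hx y hy
  split at hx <;> split at hy <;> simp_all

theorem altAdvance_spec (braces : List Int) (r : Int) : ∀ (fuel bp : Nat),
    braces.length ≤ bp + fuel →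
    bp ≤ altAdvance braces r bp ∧ altAdvance braces r bp ≤ max bp braces.length ∧
    (∀ j, bp ≤ j → j < altAdvance braces r bp → braces.getD j 0 ≤ r) ∧
    (altAdvance braces r bp < braces.length → r < braces.getD (altAdvance braces r bp) 0) := by
  intro fuel
  induction fuel with
  | zero =>
    intro bp hbp
    rw [altAdvance]
    rw [if_neg (by omega)]
    refine ⟨le_rfl, by omega, by omega, by omega⟩
  | succ n ih =>
    intro bp hbp
    rw [altAdvance]
    split
    · rename_i hc
      obtain ⟨h1, h2, h3, h4⟩ := ih (bp + 1) (by omega)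
      refine ⟨by omega, by omega, ?_, h4⟩
      intro j hj1 hj2
      rcases Nat.eq_or_lt_of_le hj1 with rfl | hj1'
      · exact hc.2
      · exact h3 j hj1' hj2
    · rename_i hc
      refine ⟨le_rfl, by omega, by omega, fun h => ?_⟩
      by_contra hle
      exact hc ⟨h, by omega⟩

theorem getD_pos_lt (braces : List Int) (j : Nat) (hj : j < braces.length) :
    braces.getD j 0 = braces[j] := List.getD_eq_getElem braces 0 hj

theorem endIdx_eq (code : List String) (ρ : Nat) (hρ : ρ < code.length) (bp' : Nat)
    (h1 : bp' ≤ (bracesOf code).length)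
    (h2 : ∀ j, j < bp' → (bracesOf code).getD j 0 ≤ (ρ : Int))
    (h3 : bp' < (bracesOf code).length → (ρ : Int) < (bracesOf code).getD bp' 0) :
    (if bp' < (bracesOf code).length then (bracesOf code).getD bp' 0 else (code.length : Int))
      = ((firstFrom code (ρ + 1) : Nat) : Int) := by
  have hsort := bracesOf_sorted code
  have hmono : ∀ (a b : Nat) (ha : a < (bracesOf code).length) (hb : b < (bracesOf code).length),
      a < b → (bracesOf code)[a] < (bracesOf code)[b] := by
    intro a b ha hb hab
    exact (List.pairwise_iff_getElem.mp hsort) a b ha hb hab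
  -- any brace index j with ρ + 1 ≤ j < code.length must be ≥ the candidate
  have hnone : ∀ j, ρ + 1 ≤ j → ∀ (hjl : j < code.length), braceLine (code[j]'hjl) = true →
      ∃ p, ∃ (hp : p < (bracesOf code).length), (bracesOf code)[p] = (j : Int) ∧ bp' ≤ p := by
    intro j hj1 hjl hbr
    have hmem : (j : Int) ∈ bracesOf code := (mem_bracesOf code _).mpr ⟨j, hjl, rfl, hbr⟩
    rcases List.getElem_of_mem hmem with ⟨p, hp, hpe⟩
    refine ⟨p, hp, hpe, ?_⟩
    by_contra hlt
    have := h2 p (by omega)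
    rw [getD_pos_lt _ _ hp, hpe] at this
    omega
  split
  · rename_i hbl
    rw [getD_pos_lt _ _ hbl]
    have hmem : (bracesOf code)[bp'] ∈ bracesOf code := List.getElem_mem _
    rcases (mem_bracesOf code _).mp hmem with ⟨ε, hε, hεe, hεbr⟩
    rw [hεe]
    congr 1
    have hρε : ρ + 1 ≤ ε := by
      have := h3 hbl
      rw [getD_pos_lt _ _ hbl, hεe] at this
      omega
    refine (firstFrom_eq code (ρ + 1) ε hρε (by omega) (fun _ => hεbr) ?_).symm
    intro j hj1 hj2 hjl
    by_contra hbr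
    rw [Bool.not_eq_false] at hbr
    rcases hnone j hj1 hjl hbr with ⟨p, hp, hpe, hpge⟩
    rcases Nat.eq_or_lt_of_le hpge with rfl | hgt
    · rw [hpe] at hεe; omega
    · have := hmono bp' p hbl hp hgt
      rw [hpe, hεe] at this
      omega
  · rename_i hbl
    congr 1
    refine (firstFrom_eq code (ρ + 1) code.length (by omega) le_rfl (by omega) ?_).symm
    intro j hj1 hj2 hjl
    by_contra hbr
    rw [Bool.not_eq_false] at hbr
    rcases hnone j hj1 hjl hbr with ⟨p, hp, _, hpge⟩
    omega

def markersOf (code : List String) : List Int :=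
  (PySem.List.enumerate code).filterMap
    (fun p => if PySem.Str.isIn "Description" p.2 || PySem.Str.isIn "Return" p.2
              then some p.1 else none)

theorem markersOf_mem (code : List String) (x : Int) (hx : x ∈ markersOf code) :
    ∃ ρ : Nat, x = (ρ : Int) ∧ ρ < code.length := by
  rw [markersOf] at hx
  rcases List.mem_filterMap.mp hx with ⟨p, hp, he⟩
  rcases (PySem.List.mem_enumerate_iff code 0 p).mp hp with ⟨k, hk, rfl⟩
  split at he
  · exact ⟨k, by simpa using he.symm, hk⟩
  · exact absurd he (by simp)

theorem markersOf_sorted (code : List String) : (markersOf code).Pairwise (· < ·) := by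
  rw [markersOf, List.pairwise_filterMap]
  refine (PySem.List.pairwise_lt_enumerate code 0).imp ?_
  intro a b hab x hx y hy
  split at hx <;> split at hy <;> simp_all

theorem pairUp_mem_snd : ∀ (xs : List Int), ∀ p ∈ pairUp xs, p.2 ∈ xs := by
  intro xs
  induction xs using pairUp.induct with
  | case1 d r t ih =>
    intro p hp
    rw [pairUp] at hp
    rcases List.mem_cons.mp hp with rfl | hp'
    · simp
    · simp [ih p hp']
  | case2 xs h =>
    intro p hp
    cases xs with
    | nil => simp [pairUp] at hp
    | cons a tl =>
      cases tl with
      | nil => simp [pairUp] at hp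
      | cons b tl2 => exact absurd rfl (h a b tl2)

theorem pairUp_pairwise (xs : List Int) (h : xs.Pairwise (· < ·)) :
    (pairUp xs).Pairwise (fun p q => p.2 < q.2) := by
  induction xs using pairUp.induct with
  | case1 d r t ih =>
    rw [pairUp]
    rcases List.pairwise_cons.mp h with ⟨hd, h1⟩
    rcases List.pairwise_cons.mp h1 with ⟨hr, h2⟩
    refine List.pairwise_cons.mpr ⟨?_, ih h2⟩
    intro q hq
    exact hr q.2 (pairUp_mem_snd t q hq)
  | case2 xs hx =>
    cases xs with
    | nil => simp [pairUp]
    | cons a tl =>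
      cases tl with
      | nil => simp [pairUp]
      | cons b tl2 => exact absurd rfl (hx a b tl2)
theorem fold_eq (code : List String) :
    ∀ (ps : List (Int × Int)) (ds : List (List String)) (fs : List String) (bp : Nat),
    bp ≤ (bracesOf code).length →
    (∀ p ∈ ps, ∃ ρ : Nat, p.2 = (ρ : Int) ∧ ρ < code.length) →
    ps.Pairwise (fun p q => p.2 < q.2) →
    (∀ j, j < bp → ∀ p ∈ ps, (bracesOf code).getD j 0 ≤ p.2) →
    ps.foldl (aBody code) (ds, fs) =
      ((ps.foldl (bBody code (bracesOf code)) (ds, fs, bp)).1,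
       (ps.foldl (bBody code (bracesOf code)) (ds, fs, bp)).2.1) := by
  intro ps
  induction ps with
  | nil => intro ds fs bp _ _ _ _; rfl
  | cons hd rest ih =>
    intro ds fs bp hbp hmem hpair hinv
    obtain ⟨d, r⟩ := hd
    rcases hmem (d, r) (List.mem_cons_self) with ⟨ρ, hr, hρ⟩
    have hr' : r = (ρ : Int) := hr
    simp only [List.foldl_cons]
    set bp₁ := altAdvance (bracesOf code) r bp with hbp₁
    obtain ⟨ha1, ha2, ha3, ha4⟩ :=
      altAdvance_spec (bracesOf code) r (bracesOf code).length bp (by omega)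
    have hbp₁le : bp₁ ≤ (bracesOf code).length := by omega
    have hall : ∀ j, j < bp₁ → (bracesOf code).getD j 0 ≤ r := by
      intro j hj
      by_cases hjb : j < bp
      · exact hinv j hjb (d, r) List.mem_cons_self
      · exact ha3 j (by omega) hj
    have hsc : aScan code (r + 1) = ((firstFrom code (ρ + 1) : Nat) : Int) := by
      rw [hr', show ((ρ : Int) + 1) = ((ρ + 1 : Nat) : Int) from by push_cast; ring]
      exact aScan_eq code code.length (ρ + 1) (by omega)
    have hend : (if bp₁ < (bracesOf code).length then (bracesOf code).getD bp₁ 0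
          else (code.length : Int)) = ((firstFrom code (ρ + 1) : Nat) : Int) := by
      refine endIdx_eq code ρ hρ bp₁ hbp₁le ?_ ?_
      · intro j hj; rw [← hr']; exact hall j hj
      · intro h; rw [← hr']; exact ha4 h
    have hA : aBody code (ds, fs) (d, r) =
        (ds ++ [PySem.List.slice code (some d) (some (r + 1))],
         fs ++ [(PySem.List.pyGet? code (aScan code (r + 1) - 1)).getD ""]) := rfl
    have hB : bBody code (bracesOf code) (ds, fs, bp) (d, r) =
        (ds ++ [PySem.List.slice code (some d) (some (r + 1))],
         fs ++ [(PySem.List.pyGet? code ((if bp₁ < (bracesOf code).length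
                  then (bracesOf code).getD bp₁ 0 else (code.length : Int)) - 1)).getD ""],
         bp₁) := rfl
    rw [hA, hB, hsc, hend]
    refine ih _ _ bp₁ hbp₁le (fun p hp => hmem p (List.mem_cons_of_mem _ hp))
      (List.pairwise_cons.mp hpair).2 ?_
    intro j hj p hp
    have h1 := hall j hj
    have h2 := (List.pairwise_cons.mp hpair).1 p hp
    omega

theorem main_eq (code : List String) : split_funcs_py code = split_funcs_py_alt code := by
  rw [split_funcs_py, split_funcs_py_alt]
  have key : ∀ s : String,
      (PySem.Str.count s "Description" ≠ 0 ∨ PySem.Str.count s "Return" ≠ 0) ↔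
      (PySem.Str.isIn "Description" s || PySem.Str.isIn "Return" s) = true := by
    intro s
    have h1 := count_ne_zero_iff s.toList "Description".toList (by decide)
    have h2 := count_ne_zero_iff s.toList "Return".toList (by decide)
    simp only [PySem.Str.count_eq, PySem.Str.isIn_eq, Bool.or_eq_true]
    exact or_congr h1 h2
  have hm : (PySem.List.enumerate code).filterMap
      (fun p => if PySem.Str.count p.2 "Description" ≠ 0 ∨ PySem.Str.count p.2 "Return" ≠ 0
                then some p.1 else none) = markersOf code := by
    rw [markersOf]
    apply List.filterMap_congr
    intro p _
    by_cases h : (PySem.Str.isIn "Description" p.2 || PySem.Str.isIn "Return" p.2) = true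
    · rw [if_pos h, if_pos ((key p.2).mpr h)]
    · rw [if_neg h, if_neg (fun hc => h ((key p.2).mp hc))]
  have hbr : (PySem.List.enumerate code).filterMap
      (fun p => if PySem.Str.isIn "{" p.2 then some p.1 else none) = bracesOf code := rfl
  simp only [hm, hbr, slice?_even, slice?_odd, zip_everyOther]
  exact fold_eq code (pairUp (markersOf code)) [] [] 0 (by omega)
    (fun p hp => markersOf_mem code p.2 (pairUp_mem_snd _ p hp))
    (pairUp_pairwise _ (markersOf_sorted code))
    (by omega)

-- ===== VERDICT (by name: the statement is the Claim_ definition above) =====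
theorem split_funcs_py_spec : Claim_equal_split_funcs_py := by
  intro code _
  unfold Spec_split_funcs_py
  exact main_eq code
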